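-- pv_equiv track=rewrite | github.com/Joaos32/catalogo | catalog/graph_catalog.py | categorize_photos
-- ===== SOURCE A (Python) =====
-- from typing import Any, Callable, Dict, Iterable, List
--
-- def categorize_photos(items: Iterable[Dict[str, Any]], code: str | None = None) -> Dict[str, str | None]:
--     result = {"white_background": None, "ambient": None, "measures": None}
--     for item in items:
--         name = str(item.get("name", "")).lower()
--         web_url = item.get("webUrl")
--         if code and code.lower() not in name:
--             continue
--         if result["white_background"] is None and ("branco" in name or "white" in name):
--             result["white_background"] = web_url
--         if result["ambient"] is None and ("ambient" in name or "ambiente" in name):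
--             result["ambient"] = web_url
--         if result["measures"] is None and ("medida" in name or "measure" in name):
--             result["measures"] = web_url
--     return result
-- ===== SOURCE B (Python) =====
-- def categorize_photos(items, code=None):
--     items = list(items)
--     needle = code.lower() if code else None
--
--     def first_url(keywords):
--         for item in items:
--             name = str(item.get("name", "")).lower()
--             url = item.get("webUrl")
--             if url is None:
--                 continue
--             if needle is not None and needle not in name:
--                 continue
--             if any(kw in name for kw in keywords):
--                 return url
--         return None
--
--     return {
--         "white_background": first_url(("branco", "white")),
--         "ambient": first_url(("ambient", "ambiente")),
--         "measures": first_url(("medida", "measure")),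
--     }
-- ===== Notes on version B (the rewrite author's own statement) =====
-- stated objective: simpler
-- what changed: Replaces A's single fill-as-you-go pass mutating a three-slot dict with three independent first-match searches (one next/find per category) driven by a keyword table; each search stops at its first hit instead of scanning the whole list.
import Mathlib
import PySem

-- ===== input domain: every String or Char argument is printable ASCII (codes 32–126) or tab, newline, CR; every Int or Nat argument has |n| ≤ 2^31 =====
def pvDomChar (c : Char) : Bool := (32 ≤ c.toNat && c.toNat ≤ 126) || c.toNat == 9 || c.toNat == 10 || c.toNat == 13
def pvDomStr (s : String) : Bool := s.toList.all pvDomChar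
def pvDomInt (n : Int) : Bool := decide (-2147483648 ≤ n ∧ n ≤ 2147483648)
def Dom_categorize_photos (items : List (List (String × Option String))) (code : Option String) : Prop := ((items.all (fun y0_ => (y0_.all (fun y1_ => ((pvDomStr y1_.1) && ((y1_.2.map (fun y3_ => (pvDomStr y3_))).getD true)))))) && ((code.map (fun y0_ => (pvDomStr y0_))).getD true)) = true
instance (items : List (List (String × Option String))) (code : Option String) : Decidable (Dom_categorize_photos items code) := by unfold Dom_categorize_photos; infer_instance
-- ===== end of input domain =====

-- B replaces A's single fill-as-you-go loop over a mutable triple by three independent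
-- first-match searches driven by a keyword table (objective: simpler decomposition, same cost).

-- ===== PORT A =====
-- shared helper: name = str(item.get("name", "")).lower()  (str(None) = "None")
def pvNameOf (item : List (String × Option String)) : String :=
  PySem.Str.lower (match PySem.Dict.get? (PySem.Dict.mk item) "name" with
    | none => ""
    | some none => "None"
    | some (some s) => s)

-- shared helper: web_url = item.get("webUrl")  (missing key and stored None both give none)
def pvUrlOf (item : List (String × Option String)) : Option String :=
  match PySem.Dict.get? (PySem.Dict.mk item) "webUrl" with
  | some (some u) => some u
  | _ => none

-- 'if code and code.lower() not in name: continue'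
def pvSkipA (code : Option String) (name : String) : Bool :=
  match code with
  | none => false
  | some c => !(c == "") && !(PySem.Str.isIn (PySem.Str.lower c) name)

def pvStepA (code : Option String) (st : Option String × Option String × Option String)
    (item : List (String × Option String)) : Option String × Option String × Option String :=
  let name := pvNameOf item
  let web_url := pvUrlOf item
  if pvSkipA code name then st
  else
    (if st.1.isNone && (PySem.Str.isIn "branco" name || PySem.Str.isIn "white" name) then web_url else st.1,
     if st.2.1.isNone && (PySem.Str.isIn "ambient" name || PySem.Str.isIn "ambiente" name) then web_url else st.2.1,
     if st.2.2.isNone && (PySem.Str.isIn "medida" name || PySem.Str.isIn "measure" name) then web_url else st.2.2)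

def categorize_photos (items : List (List (String × Option String))) (code : Option String) : List (String × Option String) :=
  let st := items.foldl (pvStepA code) (none, none, none)
  [("white_background", st.1), ("ambient", st.2.1), ("measures", st.2.2)]

-- ===== PORT B =====
-- needle = code.lower() if code else None
def pvNeedle (code : Option String) : Option String :=
  match code with
  | none => none
  | some c => if c == "" then none else some (PySem.Str.lower c)

-- first_url(keywords): first item passing all three guards; its url, else None
def pvFirstUrl (items : List (List (String × Option String))) (needle : Option String)
    (kws : List String) : Option String :=
  match items.find? (fun item =>
      let name := pvNameOf item
      (pvUrlOf item).isSome &&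
      (match needle with | none => true | some nd => PySem.Str.isIn nd name) &&
      kws.any (fun kw => PySem.Str.isIn kw name)) with
  | some item => pvUrlOf item
  | none => none

def categorize_photos_alt (items : List (List (String × Option String))) (code : Option String) : List (String × Option String) :=
  let needle := pvNeedle code
  [("white_background", pvFirstUrl items needle ["branco", "white"]),
   ("ambient", pvFirstUrl items needle ["ambient", "ambiente"]),
   ("measures", pvFirstUrl items needle ["medida", "measure"])]

-- ===== PRECONDITION & SPEC =====
def Spec_categorize_photos (items : List (List (String × Option String))) (code : Option String) (out : List (String × Option String)) : Prop := out = categorize_photos_alt items code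
instance (items : List (List (String × Option String))) (code : Option String) (out : List (String × Option String)) : Decidable (Spec_categorize_photos items code out) := by unfold Spec_categorize_photos; infer_instance

-- ===== CLAIM (what is proved, stated in full; the proofs are below) =====
def Claim_equal_categorize_photos : Prop := ∀ (items : List (List (String × Option String))) (code : Option String), Dom_categorize_photos items code → Spec_categorize_photos items code (categorize_photos items code)

-- ===== LEMMAS AND PROOFS =====

-- proof helper: what one slot of A's fold computes given its incoming value
def pvFill (code : Option String) (kws : List String)
    (items : List (List (String × Option String))) (s : Option String) : Option String :=
  match s with
  | some u => some u
  | none => pvFirstUrl items (pvNeedle code) kws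

-- B's needle guard is the negation of A's skip guard
theorem pv_needle_skip (code : Option String) (name : String) :
    (match pvNeedle code with | none => true | some nd => PySem.Str.isIn nd name) = !(pvSkipA code name) := by
  cases code with
  | none => rfl
  | some c =>
    by_cases hc : c = ""
    · simp [pvNeedle, pvSkipA, hc]
    · simp [pvNeedle, pvSkipA, hc]

theorem pv_fill_cons (code : Option String) (kws : List String)
    (item : List (String × Option String)) (rest : List (List (String × Option String)))
    (s : Option String) :
    pvFill code kws (item :: rest) s =
      pvFill code kws rest
        (if pvSkipA code (pvNameOf item) then s
         else if s.isNone && kws.any (fun kw => PySem.Str.isIn kw (pvNameOf item)) then pvUrlOf item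
         else s) := by
  cases s with
  | some u => simp [pvFill]
  | none =>
    simp only [pvFill, pvFirstUrl, List.find?_cons, pv_needle_skip]
    cases hsk : pvSkipA code (pvNameOf item) <;>
    cases hurl : pvUrlOf item <;>
    cases hkw : kws.any (fun kw => PySem.Str.isIn kw (pvNameOf item)) <;>
    simp_all

theorem pv_fold_fill (code : Option String) (items : List (List (String × Option String)))
    (w a m : Option String) :
    items.foldl (pvStepA code) (w, a, m) =
      (pvFill code ["branco", "white"] items w,
       pvFill code ["ambient", "ambiente"] items a,
       pvFill code ["medida", "measure"] items m) := by
  induction items generalizing w a m with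
  | nil => cases w <;> cases a <;> cases m <;> simp [pvFill, pvFirstUrl]
  | cons item rest ih =>
    rw [List.foldl_cons, ih]
    rw [pv_fill_cons, pv_fill_cons, pv_fill_cons]
    simp [pvStepA, apply_ite Prod.fst, apply_ite (Prod.snd : Option String × Option String × Option String → Option String × Option String), apply_ite (Prod.snd : Option String × Option String → Option String)]

-- ===== VERDICT (by name: the statement is the Claim_ definition above) =====
theorem categorize_photos_spec : Claim_equal_categorize_photos := by
  intro items code _
  unfold Spec_categorize_photos categorize_photos categorize_photos_alt
  rw [pv_fold_fill]
  simp [pvFill]
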